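-- pv_equiv track=rewrite | github.com/amit2014/leetcode-6 | leetcode.py | check
-- ===== SOURCE A (Python) =====
-- def check(s: str, w: str) -> bool:
--     i, j = 0, 0
--     for i in range(len(s)):
--         if j < len(w) and s[i] == w[j]:
--             j += 1
--         elif s[i - 1 : i + 2] != s[i] * 3 != s[i - 2 : i + 1]:
--             return False
--     return j == len(w)
-- ===== SOURCE B (Python) =====
-- def _groups(s):
--     # run-length encode: list of (char, run length)
--     groups = []
--     i = 0
--     while i < len(s):
--         j = i
--         while j < len(s) and s[j] == s[i]:
--             j += 1
--         groups.append((s[i], j - i))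
--         i = j
--     return groups
--
--
-- def check(s: str, w: str) -> bool:
--     gs = _groups(s)
--     gw = _groups(w)
--     if len(gs) != len(gw):
--         return False
--     for (c, m), (d, k) in zip(gs, gw):
--         if c != d or not (m == k or (m > k and m >= 3)):
--             return False
--     return True
-- ===== Notes on version B (the rewrite author's own statement) =====
-- stated objective: alternative
-- what changed: Replaced the interleaved two-pointer scan with chained lookback slices by run-length encoding both strings into (char, count) groups once and comparing aligned groups with the rule m==k or (m>k and m>=3).
import Mathlib
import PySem

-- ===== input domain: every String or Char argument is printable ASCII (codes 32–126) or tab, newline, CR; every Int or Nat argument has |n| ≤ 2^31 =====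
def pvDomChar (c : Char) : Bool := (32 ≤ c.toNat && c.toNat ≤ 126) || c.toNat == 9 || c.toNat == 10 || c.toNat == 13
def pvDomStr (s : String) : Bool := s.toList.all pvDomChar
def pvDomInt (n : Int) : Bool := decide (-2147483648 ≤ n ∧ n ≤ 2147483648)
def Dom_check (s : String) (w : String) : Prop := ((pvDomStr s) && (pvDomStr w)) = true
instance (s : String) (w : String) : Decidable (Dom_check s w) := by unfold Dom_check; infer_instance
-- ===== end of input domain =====

-- B replaces A's interleaved two-pointer scan with slice lookbacks by run-length
-- encoding both strings once and comparing aligned (char, count) groups (objective: alternative).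

-- ===== PORT A =====
-- Python's `for i in range(len(s))` with early `return False`, transliterated as
-- recursion on the index i with the match pointer j; the chained slice comparison
-- `s[i-1:i+2] != s[i]*3 != s[i-2:i+1]` is kept literally via PySem.List.slice.
def checkGo (cs ws : List Char) (i j : Nat) : Bool :=
  if hlt : i < cs.length then
    if j < ws.length && (ws[j]? == some cs[i]) then
      checkGo cs ws (i + 1) (j + 1)
    else if !(PySem.List.slice cs (some ((i : Int) - 1)) (some ((i : Int) + 2)) == List.replicate 3 cs[i])
           && !(PySem.List.slice cs (some ((i : Int) - 2)) (some ((i : Int) + 1)) == List.replicate 3 cs[i]) then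
      false
    else
      checkGo cs ws (i + 1) j
  else
    j == ws.length
termination_by cs.length - i

def check (s : String) (w : String) : Bool := checkGo s.toList w.toList 0 0

-- ===== PORT B =====
-- run-length encoding (Source B's _groups: scan to the end of each run, record (char, length))
def groupsB : List Char → List (Char × Nat)
  | [] => []
  | c :: rest =>
    (c, (rest.takeWhile (· == c)).length + 1) :: groupsB (rest.drop (rest.takeWhile (· == c)).length)
termination_by l => l.length
decreasing_by simp

def check_alt (s : String) (w : String) : Bool :=
  let gs := groupsB s.toList
  let gw := groupsB w.toList
  gs.length == gw.length &&
    (gs.zip gw).all (fun p => p.1.1 == p.2.1 && (p.1.2 == p.2.2 || (decide (p.2.2 < p.1.2) && decide (3 ≤ p.1.2))))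

-- ===== PRECONDITION & SPEC =====
def Spec_check (s : String) (w : String) (out : Bool) : Prop := out = check_alt s w
instance (s : String) (w : String) (out : Bool) : Decidable (Spec_check s w out) := by unfold Spec_check; infer_instance

-- ===== CLAIM (what is proved, stated in full; the proofs are below) =====
def Claim_equal_check : Prop := ∀ (s : String) (w : String), Dom_check s w → Spec_check s w (check s w)

-- ===== LEMMAS AND PROOFS =====

-- pairwise group comparison, the recursive form of check_alt's length test + zip/all
def gcmp : List (Char × Nat) → List (Char × Nat) → Bool
  | [], [] => true
  | [], _ :: _ => false
  | _ :: _, [] => false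
  | (c, m) :: gs, (d, k) :: gw => c == d && (m == k || (decide (k < m) && decide (3 ≤ m))) && gcmp gs gw

theorem gcmp_eq_alt (gs gw : List (Char × Nat)) :
    (gs.length == gw.length &&
      (gs.zip gw).all (fun p => p.1.1 == p.2.1 && (p.1.2 == p.2.2 || (decide (p.2.2 < p.1.2) && decide (3 ≤ p.1.2)))))
    = gcmp gs gw := by
  induction gs generalizing gw with
  | nil => cases gw <;> simp [gcmp]
  | cons g gs ih =>
    cases gw with
    | nil => simp [gcmp]
    | cons g' gw =>
      obtain ⟨c, m⟩ := g; obtain ⟨d, k⟩ := g'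
      simp [gcmp, ← ih gw]
      rw [Bool.and_left_comm]

-- A's loop rewritten over suffixes with a two-character memory (cs[i-2]?, cs[i-1]?)
def memGo : Option Char → Option Char → List Char → List Char → Bool
  | _, _, [], ws => ws.isEmpty
  | p2, p1, c :: rest, ws =>
    if ws.head? = some c then memGo p1 (some c) rest ws.tail
    else if (p1 = some c ∧ rest.head? = some c) ∨ (p2 = some c ∧ p1 = some c) then
      memGo p1 (some c) rest ws
    else false

def pr (cs : List Char) (i d : Nat) : Option Char := if d ≤ i then cs[i - d]? else none

theorem take3_eq_rep (l : List Char) (c : Char) :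
    (l.take 3 = List.replicate 3 c) ↔ (l[0]? = some c ∧ l[1]? = some c ∧ l[2]? = some c) := by
  rcases l with _ | ⟨a, _ | ⟨b, _ | ⟨d, t⟩⟩⟩ <;> simp [List.replicate_succ]

-- the first chained slice condition, characterised through the memory view
theorem window1_iff (cs : List Char) (i : Nat) (c : Char) (h : cs[i]? = some c) :
    (PySem.List.slice cs (some ((i : Int) - 1)) (some ((i : Int) + 2)) = List.replicate 3 c)
      ↔ (pr cs i 1 = some c ∧ (cs.drop (i + 1)).head? = some c) := by
  rcases Nat.eq_zero_or_pos i with hi | hi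
  · subst hi
    constructor
    · intro hsl
      have hlen := congrArg List.length hsl
      rw [PySem.List.length_slice] at hlen
      simp [pysem] at hlen
      omega
    · rintro ⟨h1, -⟩
      simp [pr] at h1
  · have e1 : (i : Int) - 1 = ((i - 1 : Nat) : Int) := by push_cast [hi]; omega
    have e2 : (i : Int) + 2 = ((i - 1 : Nat) : Int) + ((3 : Nat) : Int) := by push_cast [hi]; omega
    rw [e1, e2, PySem.List.slice_natCast_add, take3_eq_rep]
    rw [List.getElem?_drop, List.getElem?_drop, List.getElem?_drop]
    have e3 : i - 1 + 1 = i := by omega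
    have e4 : i - 1 + 2 = i + 1 := by omega
    rw [e3, e4]
    have hi1 : 1 ≤ i := hi
    simp [pr, hi1, h]

-- the second chained slice condition
theorem window2_iff (cs : List Char) (i : Nat) (c : Char) (h : cs[i]? = some c) :
    (PySem.List.slice cs (some ((i : Int) - 2)) (some ((i : Int) + 1)) = List.replicate 3 c)
      ↔ (pr cs i 2 = some c ∧ pr cs i 1 = some c) := by
  by_cases hi : 2 ≤ i
  · have e1 : (i : Int) - 2 = ((i - 2 : Nat) : Int) := by push_cast [hi]; omega
    have e2 : (i : Int) + 1 = ((i - 2 : Nat) : Int) + ((3 : Nat) : Int) := by push_cast [hi]; omega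
    rw [e1, e2, PySem.List.slice_natCast_add, take3_eq_rep]
    rw [List.getElem?_drop, List.getElem?_drop, List.getElem?_drop]
    have e3 : i - 2 + 1 = i - 1 := by omega
    have e4 : i - 2 + 2 = i := by omega
    rw [e3, e4]
    have hi1 : 1 ≤ i := by omega
    simp [pr, hi, hi1, h]
  · constructor
    · intro hsl
      have hlen := congrArg List.length hsl
      rw [PySem.List.length_slice] at hlen
      interval_cases i <;> simp [pysem] at hlen <;> omega
    · rintro ⟨h2, -⟩
      simp [pr, hi] at h2

theorem checkGo_eq_memGo (cs ws : List Char) (i j : Nat) (hj : j ≤ ws.length) :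
    checkGo cs ws i j = memGo (pr cs i 2) (pr cs i 1) (cs.drop i) (ws.drop j) := by
  rw [checkGo]
  by_cases hlt : i < cs.length
  · rw [dif_pos hlt]
    have h : cs[i]? = some cs[i] := List.getElem?_eq_getElem hlt
    have hdrop : cs.drop i = cs[i] :: cs.drop (i + 1) := List.drop_eq_getElem_cons hlt
    rw [hdrop, memGo]
    have hhead : (ws.drop j).head? = ws[j]? := List.head?_drop ..
    have hpr1 : pr cs (i + 1) 1 = some cs[i] := by simp [pr, h]
    have hpr2 : pr cs (i + 1) 2 = pr cs i 1 := by
      rcases Nat.eq_zero_or_pos i with h0 | h0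
      · subst h0; simp [pr]
      · have h1 : 1 ≤ i := h0
        simp [pr, h1, show 2 ≤ i + 1 by omega, show i + 1 - 2 = i - 1 by omega]
    by_cases hm : (ws.drop j).head? = some cs[i]
    · rw [if_pos hm]
      have hjlt : j < ws.length := by
        rw [hhead] at hm
        have := (List.getElem?_eq_some_iff.mp hm).1; omega
      have hcond : (j < ws.length && (ws[j]? == some cs[i])) = true := by
        simp only [hhead] at hm
        simp [hjlt]
        exact (List.getElem?_eq_some_iff.mp hm).2
      rw [if_pos hcond, checkGo_eq_memGo cs ws (i + 1) (j + 1) (by omega)]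
      rw [hpr1, hpr2, List.tail_drop]
    · have hcond : (j < ws.length && (ws[j]? == some cs[i])) = false := by
        simp only [hhead] at hm
        by_cases hjlt : j < ws.length <;> simp [hjlt]
        exact fun heq => hm (by rw [List.getElem?_eq_getElem hjlt, heq])
      simp only [hcond, Bool.false_eq_true, if_false]
      rw [if_neg hm]
      by_cases hw : (pr cs i 1 = some cs[i] ∧ (cs.drop (i + 1)).head? = some cs[i])
                  ∨ (pr cs i 2 = some cs[i] ∧ pr cs i 1 = some cs[i])
      · rw [if_pos hw]
        have hb : (!(PySem.List.slice cs (some ((i : Int) - 1)) (some ((i : Int) + 2)) == List.replicate 3 cs[i])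
           && !(PySem.List.slice cs (some ((i : Int) - 2)) (some ((i : Int) + 1)) == List.replicate 3 cs[i])) = false := by
          rcases hw with hw | hw
          · simp [(window1_iff cs i cs[i] h).mpr hw]
          · simp [(window2_iff cs i cs[i] h).mpr hw]
        simp only [hb, Bool.false_eq_true, if_false]
        rw [checkGo_eq_memGo cs ws (i + 1) j hj, hpr1, hpr2]
      · rw [if_neg hw]
        push Not at hw
        have hb : (!(PySem.List.slice cs (some ((i : Int) - 1)) (some ((i : Int) + 2)) == List.replicate 3 cs[i])
           && !(PySem.List.slice cs (some ((i : Int) - 2)) (some ((i : Int) + 1)) == List.replicate 3 cs[i])) = true := by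
          have h1 := (window1_iff cs i cs[i] h).not.mpr (by tauto)
          have h2 := (window2_iff cs i cs[i] h).not.mpr (by tauto)
          simp only [Bool.and_eq_true, Bool.not_eq_true', beq_eq_false_iff_ne, ne_eq]
          exact ⟨h1, h2⟩
        rw [if_pos hb]
  · rw [dif_neg hlt]
    have hdrop : cs.drop i = [] := List.drop_eq_nil_of_le (by omega)
    rw [hdrop, memGo]
    apply Bool.eq_iff_iff.mpr
    simp only [List.isEmpty_iff, List.drop_eq_nil_iff, beq_iff_eq]
    omega
termination_by cs.length - i
decreasing_by all_goals omega

-- the match phase: both runs consume in lock-step while w's run lasts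
theorem matchSteps (c : Char) (X Y : List Char) :
    ∀ (a b : Nat) (p2 p1 : Option Char), 1 ≤ a → a ≤ b →
      memGo p2 p1 (List.replicate a c ++ X) (List.replicate b c ++ Y)
        = memGo (if 2 ≤ a then some c else p1) (some c) X (List.replicate (b - a) c ++ Y) := by
  intro a
  induction a with
  | zero => omega
  | succ a ih =>
    intro b p2 p1 _ hab
    cases b with
    | zero => omega
    | succ b =>
      rw [List.replicate_succ, List.replicate_succ, List.cons_append, List.cons_append, memGo]
      rw [if_pos (by simp)]
      simp only [List.tail_cons]
      rcases Nat.eq_zero_or_pos a with h0 | h0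
      · subst h0
        simp
      · rw [ih b p1 (some c) h0 (by omega)]
        have he : (if 2 ≤ a then some c else some c) = some c := by split <;> rfl
        rw [he, Nat.succ_sub_succ]
        have h2 : 2 ≤ a + 1 := by omega
        rw [if_pos h2]

-- the surplus phase: s's run outlives w's; allowed iff the run reaches length ≥ 3
theorem surplusSteps (c : Char) (X W : List Char) (hX : X.head? ≠ some c) (hW : W.head? ≠ some c) :
    ∀ (r : Nat) (q2 : Option Char), 1 ≤ r →
      memGo q2 (some c) (List.replicate r c ++ X) W
        = if 2 ≤ r ∨ q2 = some c then memGo (some c) (some c) X W else false := by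
  intro r
  induction r with
  | zero => omega
  | succ r ih =>
    intro q2 _
    rw [List.replicate_succ, List.cons_append, memGo, if_neg hW]
    rcases Nat.eq_zero_or_pos r with h0 | h0
    · subst h0
      simp only [List.replicate_zero, List.nil_append]
      by_cases hq : q2 = some c
      · rw [if_pos (by tauto), if_pos (by simp [hq])]
      · rw [if_neg (by simp [hX, hq]), if_neg (by simp [hq])]
    · have hhead : (List.replicate r c ++ X).head? = some c := by
        cases r with | zero => omega | succ r => simp [List.replicate_succ]
      rw [if_pos (by tauto), ih (some c) h0, if_pos (by tauto), if_pos (by omega)]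

theorem head?_dropWhileB (p : Char → Bool) (l : List Char) (x : Char)
    (h : (l.dropWhile p).head? = some x) : p x = false := by
  induction l with
  | nil => simp [List.dropWhile] at h
  | cons a l ih =>
    by_cases hp : p a
    · exact ih (by simpa [List.dropWhile, hp] using h)
    · simp [List.dropWhile, hp] at h; simpa [h] using hp

theorem drop_len_takeWhile (p : Char → Bool) (l : List Char) :
    l.drop (l.takeWhile p).length = l.dropWhile p := by
  induction l with
  | nil => rfl
  | cons a l ih => by_cases hp : p a <;> simp [hp, ih]

-- a run-length decomposition step: the head run is a replicate block and what
-- follows does not continue it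
theorem run_decomp (c : Char) (rest : List Char) :
    rest = List.replicate (rest.takeWhile (· == c)).length c ++ rest.drop (rest.takeWhile (· == c)).length
    ∧ (rest.drop (rest.takeWhile (· == c)).length).head? ≠ some c := by
  have hrep : rest.takeWhile (· == c) = List.replicate (rest.takeWhile (· == c)).length c := by
    rw [List.eq_replicate_iff]
    exact ⟨rfl, fun b hb => by simpa using List.mem_takeWhile_imp hb⟩
  rw [drop_len_takeWhile]
  constructor
  · conv_lhs => rw [← List.takeWhile_append_dropWhile (p := (· == c)) (l := rest)]
    rw [← hrep]
  · intro hh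
    have := head?_dropWhileB (· == c) rest c hh
    simp at this

-- the heart of the equivalence: the memory-scan equals the group comparison,
-- provided the scan starts at a run boundary (p1 does not continue cs's head run)
theorem memGo_eq_gcmp_aux (n : Nat) : ∀ (cs ws : List Char) (p2 p1 : Option Char),
    cs.length ≤ n → (∀ c, cs.head? = some c → p1 ≠ some c) →
    memGo p2 p1 cs ws = gcmp (groupsB cs) (groupsB ws) := by
  induction n with
  | zero =>
    intro cs ws p2 p1 hn hp
    have hcs : cs = [] := by cases cs with | nil => rfl | cons c r => simp at hn
    subst hcs
    cases ws with
    | nil => simp [memGo, groupsB, gcmp]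
    | cons d wrest => rw [groupsB]; simp [memGo, groupsB, gcmp]
  | succ n ih =>
    intro cs ws p2 p1 hn hp
    cases cs with
    | nil =>
      cases ws with
      | nil => simp [memGo, groupsB, gcmp]
      | cons d wrest => rw [groupsB]; simp [memGo, groupsB, gcmp]
    | cons c rest =>
        have hp1 : p1 ≠ some c := hp c (by simp)
        obtain ⟨hrest, hX⟩ := run_decomp c rest
        rw [groupsB]
        set a := (rest.takeWhile (· == c)).length with ha
        set X := rest.drop a with hXdef
        have hXlen : X.length ≤ n := by
          rw [hXdef]; simp at hn ⊢; omega
        cases ws with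
        | nil =>
          rw [memGo, if_neg (by simp), if_neg (by tauto)]
          simp [groupsB, gcmp]
        | cons d wrest =>
          by_cases hdc : d = c
          · subst hdc
            obtain ⟨hwrest, hY⟩ := run_decomp d wrest
            rw [groupsB]
            set b := (wrest.takeWhile (· == d)).length with hb
            set Y := wrest.drop b with hYdef
            have hcs : d :: rest = List.replicate (a + 1) d ++ X := by
              rw [List.replicate_succ, List.cons_append]; congr 1
            have hws : d :: wrest = List.replicate (b + 1) d ++ Y := by
              rw [List.replicate_succ, List.cons_append]; congr 1
            by_cases hmk : a + 1 ≤ b + 1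
            · rw [hcs, hws, matchSteps d X Y (a + 1) (b + 1) p2 p1 (by omega) hmk]
              by_cases heq : a = b
              · have h0 : b + 1 - (a + 1) = 0 := by omega
                rw [h0]
                simp only [List.replicate_zero, List.nil_append]
                rw [ih X Y _ (some d) hXlen (fun c' hc' hs => hX (hs ▸ hc'))]
                rw [gcmp]
                simp [heq]
              · have hkm1 : 1 ≤ b + 1 - (a + 1) := by omega
                have hfalse : memGo (if 2 ≤ a + 1 then some d else p1) (some d) X
                    (List.replicate (b + 1 - (a + 1)) d ++ Y) = false := by
                  cases hXc : X with
                  | nil =>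
                    rw [memGo]
                    have h0 : b + 1 - (a + 1) ≠ 0 := by omega
                    simp [List.append_eq_nil_iff, List.replicate_eq_nil_iff]
                    intro h; exact absurd h (by omega)
                  | cons c' X' =>
                    have hc' : ¬ c' = d := by
                      intro h; apply hX; rw [hXc, h]; rfl
                    rw [memGo]
                    have hh : (List.replicate (b + 1 - (a + 1)) d ++ Y).head? = some d := by
                      cases hbk : b + 1 - (a + 1) with
                      | zero => omega
                      | succ t => simp [List.replicate_succ]
                    have hng1 : ¬ ((List.replicate (b + 1 - (a + 1)) d ++ Y).head? = some c') := by
                      rw [hh]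
                      intro hcontra
                      exact hc' (show d = c' by simpa using hcontra).symm
                    rw [if_neg hng1, if_neg (by
                        simp only [not_or, not_and]
                        exact ⟨fun h => (hc' (by simpa using h.symm)).elim,
                               fun _ h => hc' (by simpa using h.symm)⟩)]
                rw [hfalse, gcmp]
                have h1 : (a + 1 == b + 1) = false := by simp; omega
                simp [h1, show ¬(b + 1 < a + 1) by omega]
            · have hkm : b + 1 < a + 1 := by omega
              have hsplit : List.replicate (a + 1) d = List.replicate (b + 1) d ++ List.replicate (a + 1 - (b + 1)) d := by
                rw [← List.replicate_add]; congr 1; omega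
              rw [hcs, hws, hsplit, List.append_assoc,
                matchSteps d (List.replicate (a + 1 - (b + 1)) d ++ X) Y (b + 1) (b + 1) p2 p1 (by omega) le_rfl,
                Nat.sub_self]
              simp only [List.replicate_zero, List.nil_append]
              rw [surplusSteps d X Y hX hY (a + 1 - (b + 1)) _ (by omega)]
              have hq : ((if 2 ≤ b + 1 then some d else p1) = some d) ↔ 1 ≤ b := by
                by_cases h2b : 2 ≤ b + 1
                · simp [h2b]; omega
                · simp [h2b, hp1]; omega
              by_cases hcond : 2 ≤ a + 1 - (b + 1) ∨ (if 2 ≤ b + 1 then some d else p1) = some d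
              · rw [if_pos hcond]
                rw [ih X Y _ (some d) hXlen (fun c' hc' hs => hX (hs ▸ hc'))]
                rw [gcmp]
                have h3m : 3 ≤ a + 1 := by
                  rcases hcond with h | h
                  · omega
                  · rw [hq] at h; omega
                have h1 : (a + 1 == b + 1) = false := by simp; omega
                simp [h1, show b + 1 < a + 1 by omega, h3m]
              · rw [if_neg hcond, gcmp]
                push Not at hcond
                obtain ⟨hc1, hc2⟩ := hcond
                have hb0 : ¬ 1 ≤ b := fun h => hc2 (hq.mpr h)
                have h1 : (a + 1 == b + 1) = false := by simp; omega
                have h3m : ¬ 3 ≤ a + 1 := by omega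
                simp [h1, h3m]
          · rw [memGo, if_neg (by simp [hdc]), if_neg (by tauto), groupsB, gcmp]
            simp [show ¬ c = d from fun h => hdc h.symm]

theorem memGo_eq_gcmp (cs ws : List Char) (p2 p1 : Option Char)
    (hp : ∀ c, cs.head? = some c → p1 ≠ some c) :
    memGo p2 p1 cs ws = gcmp (groupsB cs) (groupsB ws) :=
  memGo_eq_gcmp_aux cs.length cs ws p2 p1 le_rfl hp

-- ===== VERDICT (by name: the statement is the Claim_ definition above) =====
theorem check_spec : Claim_equal_check := by
  intro s w _
  unfold Spec_check check check_alt
  rw [gcmp_eq_alt]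
  rw [checkGo_eq_memGo s.toList w.toList 0 0 (Nat.zero_le _)]
  simp only [List.drop_zero]
  have hpr1 : pr s.toList 0 1 = none := by simp [pr]
  have hpr2 : pr s.toList 0 2 = none := by simp [pr]
  rw [hpr1, hpr2]
  exact memGo_eq_gcmp _ _ _ _ (fun c _ h => by cases h)
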